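-- pv_equiv track=rewrite | github.com/monika-chauhan/Sliding-Window-Pattern-Questions | Sliding Window Questions/count occurrences of anagram in string.py | CountAnagram
-- ===== SOURCE A (Python) =====
-- def CountAnagram(text, word):
--     ana = ''
--     count = 0
--     hashMap = {}
--     w = len(word)
--     for i in range(w):
--          ana += text[i]
--
--     if isAnagram(ana, word):
--         count += 1
--
--     for i in range(1, len(text)):
--         ana = ana[1:] + text[i]
--
--         if ana not in hashMap and isAnagram(ana, word):
--             count += 1
--             hashMap[ana] = 0
--         hashMap[ana] = 0
--     return count
--
-- def isAnagram(ana, w):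
--
--     if len(ana) != len(w):
--         return False
--
--     ana_dict = [0] * 26
--
--     for ch in ana:
--         ana_dict[ord(ch) - ord('a')] = 1
--
--     for c in w:
--         if ana_dict[ord(c) - ord('a')] == 0:
--             return False
--     return True
-- ===== SOURCE B (Python) =====
-- def CountAnagram(text, word):
--     # Rolling letter-class counts over A's window sequence, presence checked
--     # against the word's required classes; dedup via a set of matching windows only.
--     w = len(word)
--     if w == 0:
--         return 1
--     need = {ord(c) - 97 for c in word}
--     win = text[:w]
--     cnt = [0] * 26
--     for ch in win:
--         cnt[ord(ch) - 97] += 1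
--     count = 1 if sum(1 for k in need if cnt[k] > 0) == len(need) else 0
--     seen = set()
--     for i in range(1, len(text)):
--         cnt[ord(win[0]) - 97] -= 1
--         win = win[1:] + text[i]
--         cnt[ord(text[i]) - 97] += 1
--         if sum(1 for k in need if cnt[k] > 0) == len(need) and win not in seen:
--             count += 1
--             seen.add(win)
--     return count
-- ===== Notes on version B (the rewrite author's own statement) =====
-- stated objective: alternative
-- what changed: B keeps a rolling multiset of letter-class counts (updated by the leaving and the entering character) and tests each window by checking that every required class of the word has a positive count, instead of A's per-window rebuild of a 26-cell presence array; deduplication uses a set of matching windows only instead of A's dict of every window.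
-- outside the precondition, e.g. on CountAnagram('aa', 'z{'): A returns 0, B raises IndexError
import Mathlib
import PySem

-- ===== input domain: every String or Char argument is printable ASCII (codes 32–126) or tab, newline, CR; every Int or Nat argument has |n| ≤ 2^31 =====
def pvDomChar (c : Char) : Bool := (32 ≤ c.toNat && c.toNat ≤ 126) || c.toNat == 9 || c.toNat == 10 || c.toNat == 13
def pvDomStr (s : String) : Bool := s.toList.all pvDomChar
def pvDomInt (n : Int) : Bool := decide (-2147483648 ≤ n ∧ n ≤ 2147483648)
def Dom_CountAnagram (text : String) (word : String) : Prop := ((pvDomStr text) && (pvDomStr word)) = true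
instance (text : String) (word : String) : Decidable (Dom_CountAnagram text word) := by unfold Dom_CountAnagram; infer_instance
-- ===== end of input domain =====

-- B replaces A's per-window rebuild of a 26-cell presence array (and its dict of every
-- window) by a rolling multiset of letter-class counts checked against the word's
-- required classes, deduplicating via a set of matching windows only ("alternative").

-- ord(ch) - ord('a')
def pvCls (c : Char) : Int := (c.toNat : Int) - 97

-- Python list index into the 26-cell array: negative indices wrap (exact for
-- -26 ≤ i < 26, the only indices Pre_ admits; Python raises IndexError outside).
def pvIdx (i : Int) : Nat := (PySem.Int.mod i 26).toNat

def pvGet (d : List Int) (i : Int) : Int := d.getD (pvIdx i) 0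

def pvSet (d : List Int) (i : Int) (v : Int) : List Int := d.set (pvIdx i) v

-- ===== PORT A =====
def isAnagramA (ana : List Char) (w : List Char) : Bool :=
  if ana.length ≠ w.length then false
  else
    -- ana_dict = [0]*26; for ch in ana: ana_dict[ord(ch)-ord('a')] = 1
    let d := ana.foldl (fun d ch => pvSet d (pvCls ch) 1) (List.replicate 26 (0 : Int))
    -- for c in w: if ana_dict[ord(c)-ord('a')] == 0: return False / return True
    !(w.any (fun c => pvGet d (pvCls c) == 0))

def stepA (t : List Char) (wl : List Char)
    (st : Int × List Char × PySem.Dict (List Char) Int) (i : Int) :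
    Int × List Char × PySem.Dict (List Char) Int :=
  -- ana = ana[1:] + text[i]   (text[i] is in range for every loop index)
  let ana := PySem.List.slice st.2.1 (some 1) none ++ [PySem.List.pyGetD t i 'a']
  if !(st.2.2.contains ana) && isAnagramA ana wl then
    (st.1 + 1, ana, ((st.2.2.insert ana 0).insert ana 0))
  else
    (st.1, ana, st.2.2.insert ana 0)

def initA (t : List Char) (wl : List Char) :
    Int × List Char × PySem.Dict (List Char) Int :=
  -- for i in range(w): ana += text[i]; if isAnagram(ana, word): count += 1
  let ana := (PySem.List.pyRange 0 (wl.length : Int) 1).foldl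
    (fun ana i => ana ++ [PySem.List.pyGetD t i 'a']) ([] : List Char)
  (if isAnagramA ana wl then 1 else 0, ana, PySem.Dict.empty)

def CountAnagramCore (t : List Char) (wl : List Char) : Int :=
  ((PySem.List.pyRange 1 (t.length : Int) 1).foldl (stepA t wl) (initA t wl)).1

def CountAnagram (text : String) (word : String) : Int :=
  CountAnagramCore text.toList word.toList

-- ===== PORT B =====
-- sum(1 for k in need if cnt[k] > 0)  (order-independent consumption of the set)
def pvPresent (need : PySem.Set Int) (cnt : List Int) : Nat :=
  (need.filter (fun k => decide (0 < pvGet cnt k))).length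

def stepB (t : List Char) (need : PySem.Set Int)
    (st : Int × List Char × List Int × PySem.Set (List Char)) (i : Int) :
    Int × List Char × List Int × PySem.Set (List Char) :=
  -- cnt[ord(win[0]) - 97] -= 1   (win is nonempty on every admitted input)
  let out := st.2.1.headD 'a'
  let cnt1 := pvSet st.2.2.1 (pvCls out) (pvGet st.2.2.1 (pvCls out) - 1)
  -- win = win[1:] + text[i]; cnt[ord(text[i]) - 97] += 1
  let c := PySem.List.pyGetD t i 'a'
  let win := PySem.List.slice st.2.1 (some 1) none ++ [c]
  let cnt2 := pvSet cnt1 (pvCls c) (pvGet cnt1 (pvCls c) + 1)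
  if (pvPresent need cnt2 == need.length) && !(PySem.Set.contains st.2.2.2 win) then
    (st.1 + 1, win, cnt2, PySem.Set.add st.2.2.2 win)
  else
    (st.1, win, cnt2, st.2.2.2)

def initB (t : List Char) (wl : List Char) :
    Int × List Char × List Int × PySem.Set (List Char) :=
  let need : PySem.Set Int := PySem.Set.ofList (wl.map pvCls)
  let win := t.take wl.length
  let cnt := win.foldl
    (fun cnt ch => pvSet cnt (pvCls ch) (pvGet cnt (pvCls ch) + 1))
    (List.replicate 26 (0 : Int))
  (if pvPresent need cnt == need.length then 1 else 0, win, cnt, PySem.Set.empty)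

def CountAnagram_altCore (t : List Char) (wl : List Char) : Int :=
  if wl.length == 0 then 1
  else ((PySem.List.pyRange 1 (t.length : Int) 1).foldl
    (stepB t (PySem.Set.ofList (wl.map pvCls))) (initB t wl)).1

def CountAnagram_alt (text : String) (word : String) : Int :=
  CountAnagram_altCore text.toList word.toList

-- ===== PRECONDITION & SPEC =====
-- Pre_ excludes (a) words longer than the text, where A's first loop raises IndexError,
-- and (b) (for a nonempty word) inputs with a character outside 'G'..'z', on which A's
-- 26-cell array indexing raises IndexError on every reachable occurrence — except word
-- characters hidden behind the presence scan's early False, where A still returns; see cites.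
def Pre_CountAnagram (text : String) (word : String) : Prop :=
  word.toList.length ≤ text.toList.length ∧
  (word.toList ≠ [] →
    ((text.toList ++ word.toList).all (fun c => 71 ≤ c.toNat && c.toNat ≤ 122)) = true)

instance (text : String) (word : String) : Decidable (Pre_CountAnagram text word) := by
  unfold Pre_CountAnagram; infer_instance

def pvWitness_CountAnagram : String × String := ("abab", "ab")

def Spec_CountAnagram (text : String) (word : String) (out : Int) : Prop :=
  out = CountAnagram_alt text word
instance (text : String) (word : String) (out : Int) : Decidable (Spec_CountAnagram text word out) := by
  unfold Spec_CountAnagram; infer_instance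

-- ===== CLAIM (what is proved, stated in full; the proofs are below) =====
def Claim_equal_CountAnagram : Prop := ∀ (text : String) (word : String),
  Dom_CountAnagram text word → Pre_CountAnagram text word →
  Spec_CountAnagram text word (CountAnagram text word)

-- ===== LEMMAS AND PROOFS =====

-- number of characters of s falling in letter cell m
def clsCount (s : List Char) (m : Nat) : Int :=
  (s.countP (fun ch => pvIdx (pvCls ch) == m) : Int)

theorem pvIdx_lt (i : Int) : pvIdx i < 26 := by
  unfold pvIdx
  have h1 := PySem.Int.mod_lt i (b := 26) (by norm_num)
  have h2 := PySem.Int.mod_nonneg i (b := 26) (by norm_num)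
  omega

theorem length_pvSet (d : List Int) (i : Int) (v : Int) : (pvSet d i v).length = d.length := by
  simp [pvSet]

theorem getD_pvSet (d : List Int) (hd : d.length = 26) (i : Int) (v : Int) (m : Nat)
    (hm : m < 26) :
    (pvSet d i v).getD m 0 = if pvIdx i = m then v else d.getD m 0 := by
  have h := pvIdx_lt i
  simp only [pvSet, List.getD_eq_getElem?_getD, List.getElem?_set]
  split_ifs <;> simp_all

theorem length_foldl_pvSet (s : List Char) (g : List Int → Char → Int) (d : List Int) :
    (s.foldl (fun d ch => pvSet d (pvCls ch) (g d ch)) d).length = d.length := by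
  induction s generalizing d with
  | nil => rfl
  | cons a s ih => rw [List.foldl_cons, ih, length_pvSet]

theorem markA_getD (s : List Char) (d : List Int) (hd : d.length = 26) (m : Nat)
    (hm : m < 26) :
    (s.foldl (fun d ch => pvSet d (pvCls ch) 1) d).getD m 0
      = if (∃ ch ∈ s, pvIdx (pvCls ch) = m) then 1 else d.getD m 0 := by
  induction s generalizing d with
  | nil => simp
  | cons a s ih =>
      rw [List.foldl_cons, ih _ (by rw [length_pvSet, hd]),
        getD_pvSet d hd (pvCls a) 1 m hm]
      by_cases h1 : ∃ ch ∈ s, pvIdx (pvCls ch) = m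
      · simp [h1]
      · by_cases h2 : pvIdx (pvCls a) = m <;> simp [h1, h2]

theorem bump_getD (s : List Char) (d : List Int) (hd : d.length = 26) (m : Nat)
    (hm : m < 26) :
    (s.foldl (fun cnt ch => pvSet cnt (pvCls ch) (pvGet cnt (pvCls ch) + 1)) d).getD m 0
      = d.getD m 0 + clsCount s m := by
  induction s generalizing d with
  | nil => simp [clsCount]
  | cons a s ih =>
      rw [List.foldl_cons, ih _ (by rw [length_pvSet, hd])]
      simp only [clsCount, List.countP_cons, beq_iff_eq, pvGet,
        getD_pvSet d hd (pvCls a) _ m hm]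
      split_ifs with h
      · rw [h]; push_cast; ring
      · push_cast; ring

theorem match_eq (wl s : List Char) (cnt : List Int) (hlen : s.length = wl.length)
    (hcl : cnt.length = 26) (hc : ∀ m, m < 26 → cnt.getD m 0 = clsCount s m) :
    isAnagramA s wl
      = (pvPresent (PySem.Set.ofList (wl.map pvCls)) cnt
          == (PySem.Set.ofList (wl.map pvCls)).length) := by
  apply Bool.coe_iff_coe.mp
  have hL : isAnagramA s wl = true ↔
      ∀ c ∈ wl, ∃ ch ∈ s, pvIdx (pvCls ch) = pvIdx (pvCls c) := by
    unfold isAnagramA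
    rw [if_neg (by simp [hlen])]
    have hd : ∀ c : Char,
        pvGet (s.foldl (fun d ch => pvSet d (pvCls ch) 1) (List.replicate 26 (0:Int))) (pvCls c)
          = if (∃ ch ∈ s, pvIdx (pvCls ch) = pvIdx (pvCls c)) then 1 else 0 := by
      intro c
      unfold pvGet
      rw [markA_getD s _ (by simp) _ (pvIdx_lt _)]
      split_ifs
      · rfl
      · rw [List.getD_eq_getElem?_getD, List.getElem?_replicate]
        rw [if_pos (pvIdx_lt _)]
        rfl
    rw [Bool.not_eq_true', List.any_eq_false]
    constructor
    · intro h c hcw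
      have := h c hcw
      rw [hd] at this
      by_contra hno
      simp [hno] at this
    · intro h c hcw
      rw [hd]
      simp [h c hcw]
  have hR : (pvPresent (PySem.Set.ofList (wl.map pvCls)) cnt
        == (PySem.Set.ofList (wl.map pvCls)).length) = true ↔
      ∀ c ∈ wl, ∃ ch ∈ s, pvIdx (pvCls ch) = pvIdx (pvCls c) := by
    rw [beq_iff_eq]
    unfold pvPresent
    rw [List.length_filter_eq_length_iff]
    constructor
    · intro h c hcw
      have hk := h (pvCls c) ((PySem.Set.mem_ofList _ _).mpr (List.mem_map_of_mem hcw))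
      rw [decide_eq_true_iff] at hk
      have := hc (pvIdx (pvCls c)) (pvIdx_lt _)
      rw [pvGet, this, clsCount] at hk
      have : 0 < s.countP (fun ch => pvIdx (pvCls ch) == pvIdx (pvCls c)) := by exact_mod_cast hk
      obtain ⟨ch, hch, hpc⟩ := List.countP_pos_iff.mp this
      exact ⟨ch, hch, by simpa using hpc⟩
    · intro h k hk
      rw [PySem.Set.mem_ofList] at hk
      obtain ⟨c, hcw, rfl⟩ := List.mem_map.mp hk
      rw [decide_eq_true_iff, pvGet, hc (pvIdx (pvCls c)) (pvIdx_lt _), clsCount]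
      obtain ⟨ch, hch, hpc⟩ := h c hcw
      have : 0 < s.countP (fun ch => pvIdx (pvCls ch) == pvIdx (pvCls c)) :=
        List.countP_pos_iff.mpr ⟨ch, hch, by simpa using hpc⟩
      exact_mod_cast this
  rw [hL, hR]

theorem cnt_step (cnt : List Int) (o c : Char) (rest : List Char)
    (hcl : cnt.length = 26) (hc : ∀ m, m < 26 → cnt.getD m 0 = clsCount (o :: rest) m)
    (m : Nat) (hm : m < 26) :
    (pvSet (pvSet cnt (pvCls o) (pvGet cnt (pvCls o) - 1)) (pvCls c)
        (pvGet (pvSet cnt (pvCls o) (pvGet cnt (pvCls o) - 1)) (pvCls c) + 1)).getD m 0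
      = clsCount (rest ++ [c]) m := by
  have hcl1 : (pvSet cnt (pvCls o) (pvGet cnt (pvCls o) - 1)).length = 26 := by
    rw [length_pvSet, hcl]
  have hb : pvGet (pvSet cnt (pvCls o) (pvGet cnt (pvCls o) - 1)) (pvCls c)
      = if pvIdx (pvCls o) = pvIdx (pvCls c) then pvGet cnt (pvCls o) - 1
        else cnt.getD (pvIdx (pvCls c)) 0 := by
    unfold pvGet
    rw [getD_pvSet cnt hcl _ _ _ (pvIdx_lt (pvCls c))]
  rw [getD_pvSet _ hcl1 _ _ m hm, hb, getD_pvSet cnt hcl _ _ m hm]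
  have ho : pvGet cnt (pvCls o) = clsCount (o :: rest) (pvIdx (pvCls o)) := by
    unfold pvGet; rw [hc _ (pvIdx_lt (pvCls o))]
  rw [ho, hc _ (pvIdx_lt (pvCls c)), hc m hm]
  simp only [clsCount, List.countP_cons, List.countP_append, List.countP_nil, beq_iff_eq]
  by_cases h1 : pvIdx (pvCls c) = m <;> by_cases h2 : pvIdx (pvCls o) = m <;>
    by_cases h3 : pvIdx (pvCls o) = pvIdx (pvCls c) <;>
      simp [h1, h2, h3] <;> push_cast <;> omega

-- loop invariant tying A's state (count, ana, hashMap) to B's (count, win, cnt, seen)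
def LoopInv (wl : List Char) (stA : Int × List Char × PySem.Dict (List Char) Int)
    (stB : Int × List Char × List Int × PySem.Set (List Char)) : Prop :=
  stA.1 = stB.1 ∧ stA.2.1 = stB.2.1 ∧ stA.2.1.length = wl.length ∧
  stB.2.2.1.length = 26 ∧ (∀ m, m < 26 → stB.2.2.1.getD m 0 = clsCount stB.2.1 m) ∧
  ∀ s : List Char, s ∈ stB.2.2.2 ↔ (stA.2.2.contains s = true ∧ isAnagramA s wl = true)

theorem step_inv (t wl : List Char) (hwl : wl ≠ []) (i : Int)
    (stA : Int × List Char × PySem.Dict (List Char) Int)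
    (stB : Int × List Char × List Int × PySem.Set (List Char))
    (h : LoopInv wl stA stB) :
    LoopInv wl (stepA t wl stA i) (stepB t (PySem.Set.ofList (wl.map pvCls)) stB i) := by
  obtain ⟨ca, ana, hmap⟩ := stA
  obtain ⟨cb, win, cnt, seen⟩ := stB
  obtain ⟨h1, h2, h3, h4, h5, h6⟩ := h
  simp only at h1 h2 h3 h4 h5 h6
  subst h2
  subst h1
  cases ana with
  | nil =>
      exfalso
      exact hwl (List.length_eq_zero_iff.mp h3.symm)
  | cons o rest =>
  simp only [stepA, stepB, PySem.List.slice_from_one, List.tail_cons, List.headD_cons]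
  have hcnt2 : ∀ m, m < 26 →
      (pvSet (pvSet cnt (pvCls o) (pvGet cnt (pvCls o) - 1)) (pvCls (PySem.List.pyGetD t i 'a'))
        (pvGet (pvSet cnt (pvCls o) (pvGet cnt (pvCls o) - 1)) (pvCls (PySem.List.pyGetD t i 'a')) + 1)).getD m 0
        = clsCount (rest ++ [PySem.List.pyGetD t i 'a']) m :=
    fun m hm => cnt_step cnt o _ rest h4 h5 m hm
  have hcl2 : (pvSet (pvSet cnt (pvCls o) (pvGet cnt (pvCls o) - 1)) (pvCls (PySem.List.pyGetD t i 'a'))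
        (pvGet (pvSet cnt (pvCls o) (pvGet cnt (pvCls o) - 1)) (pvCls (PySem.List.pyGetD t i 'a')) + 1)).length = 26 := by
    rw [length_pvSet, length_pvSet, h4]
  have hlen' : (rest ++ [PySem.List.pyGetD t i 'a']).length = wl.length := by
    simp at h3 ⊢; omega
  have hmatch : isAnagramA (rest ++ [PySem.List.pyGetD t i 'a']) wl
      = (pvPresent (PySem.Set.ofList (wl.map pvCls))
          (pvSet (pvSet cnt (pvCls o) (pvGet cnt (pvCls o) - 1)) (pvCls (PySem.List.pyGetD t i 'a'))
            (pvGet (pvSet cnt (pvCls o) (pvGet cnt (pvCls o) - 1)) (pvCls (PySem.List.pyGetD t i 'a')) + 1))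
          == (PySem.Set.ofList (wl.map pvCls)).length) :=
    match_eq wl _ _ hlen' hcl2 hcnt2
  have hseen : PySem.Set.contains seen (rest ++ [PySem.List.pyGetD t i 'a'])
      = (hmap.contains (rest ++ [PySem.List.pyGetD t i 'a'])
          && isAnagramA (rest ++ [PySem.List.pyGetD t i 'a']) wl) := by
    apply Bool.coe_iff_coe.mp
    rw [PySem.Set.contains_iff, h6, Bool.and_eq_true]
  rw [← hmatch, hseen]
  have hbool : ∀ a b : Bool, (a && !(b && a)) = (!b && a) := by decide
  rw [hbool]
  by_cases hcond : (!(hmap.contains (rest ++ [PySem.List.pyGetD t i 'a']))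
      && isAnagramA (rest ++ [PySem.List.pyGetD t i 'a']) wl) = true
  · rw [if_pos hcond, if_pos hcond]
    rw [Bool.and_eq_true, Bool.not_eq_true'] at hcond
    obtain ⟨hH, hM⟩ := hcond
    refine ⟨rfl, rfl, hlen', hcl2, hcnt2, ?_⟩
    intro s
    rw [PySem.Dict.insert_insert_self, PySem.Set.mem_add, h6,
      PySem.Dict.contains_insert]
    by_cases hs : s = (rest ++ [PySem.List.pyGetD t i 'a'])
    · subst hs; simp [hM]
    · simp [hs]
  · rw [if_neg hcond, if_neg hcond]
    refine ⟨rfl, rfl, hlen', hcl2, hcnt2, ?_⟩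
    intro s
    rw [h6, PySem.Dict.contains_insert]
    by_cases hs : s = (rest ++ [PySem.List.pyGetD t i 'a'])
    · subst hs
      simp only [beq_self_eq_true, Bool.true_or, true_and]
      cases hM : isAnagramA (rest ++ [PySem.List.pyGetD t i 'a']) wl with
      | false => simp [hM]
      | true =>
          have hH : hmap.contains (rest ++ [PySem.List.pyGetD t i 'a']) = true := by
            by_contra hH
            rw [Bool.not_eq_true] at hH
            exact hcond (by rw [hH, hM]; rfl)
          simp [hH, hM]
    · simp [hs]

theorem fold_inv (t wl : List Char) (hwl : wl ≠ []) (l : List Int) :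
    ∀ stA stB, LoopInv wl stA stB →
      LoopInv wl (l.foldl (stepA t wl) stA)
        (l.foldl (stepB t (PySem.Set.ofList (wl.map pvCls))) stB) := by
  induction l with
  | nil => intro stA stB h; exact h
  | cons i l ih =>
      intro stA stB h
      exact ih _ _ (step_inv t wl hwl i stA stB h)

theorem ana0_eq (t wl : List Char) (hw : wl.length ≤ t.length) :
    (PySem.List.pyRange 0 (wl.length : Int) 1).foldl
      (fun ana i => ana ++ [PySem.List.pyGetD t i 'a']) ([] : List Char)
      = t.take wl.length := by
  rw [PySem.List.foldl_append_singleton_eq_map (f := fun i => PySem.List.pyGetD t i 'a')]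
  rw [PySem.List.pyRange_zero_natCast, List.map_map]
  apply List.ext_getElem
  · simp [min_eq_left hw]
  · intro n h1 h2
    simp only [List.getElem_take]
    have hn : n < t.length := by simp at h1; omega
    simp [List.getD_eq_getElem?_getD, List.getElem?_eq_getElem hn]

theorem init_inv (t wl : List Char) (hwl : wl ≠ []) (hw : wl.length ≤ t.length) :
    LoopInv wl (initA t wl) (initB t wl) := by
  unfold initA initB
  have htake : (t.take wl.length).length = wl.length := by simp [min_eq_left hw]
  have hcl : ((t.take wl.length).foldl
      (fun cnt ch => pvSet cnt (pvCls ch) (pvGet cnt (pvCls ch) + 1))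
      (List.replicate 26 (0 : Int))).length = 26 := by
    rw [length_foldl_pvSet]; simp
  have hcnt : ∀ m, m < 26 →
      ((t.take wl.length).foldl
        (fun cnt ch => pvSet cnt (pvCls ch) (pvGet cnt (pvCls ch) + 1))
        (List.replicate 26 (0 : Int))).getD m 0 = clsCount (t.take wl.length) m := by
    intro m hm
    rw [bump_getD _ _ (by simp) m hm, List.getD_eq_getElem?_getD,
      List.getElem?_replicate, if_pos hm]
    simp
  rw [ana0_eq t wl hw]
  refine ⟨?_, rfl, htake, hcl, hcnt, ?_⟩
  · simp only
    rw [match_eq wl (t.take wl.length) _ htake hcl hcnt]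
  · intro s
    simp [PySem.Set.empty, PySem.Dict.contains_empty]

theorem isAnagramA_append_nil (xs : List Char) (c : Char) :
    isAnagramA (xs ++ [c]) [] = false := by
  unfold isAnagramA
  rw [if_pos (by simp)]

theorem foldA_nilword (t : List Char) (l : List Int) :
    ∀ st, (l.foldl (stepA t []) st).1 = st.1 := by
  induction l with
  | nil => intro st; rfl
  | cons i l ih =>
      intro st
      rw [List.foldl_cons, ih]
      simp [stepA, isAnagramA_append_nil]

-- ===== VERDICT (by name: the statement is the Claim_ definition above) =====
theorem CountAnagram_spec : Claim_equal_CountAnagram := by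
  unfold Claim_equal_CountAnagram
  intro text word _ hpre
  unfold Spec_CountAnagram CountAnagram CountAnagram_alt
  obtain ⟨hw, _⟩ := hpre
  by_cases hnil : word.toList = []
  · rw [hnil]
    unfold CountAnagram_altCore
    rw [if_pos (by simp)]
    unfold CountAnagramCore
    rw [foldA_nilword]
    rfl
  · unfold CountAnagramCore CountAnagram_altCore
    rw [if_neg (by simpa using hnil)]
    exact (fold_inv text.toList word.toList hnil _ _ _
      (init_inv text.toList word.toList hnil hw)).1
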